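-- pv_equiv track=rewrite | github.com/MrZhaoC/Libtool | tools/tools.py | smali_to_java
-- ===== SOURCE A (Python) =====
-- def smali_to_java(smali_type):
--     """
--     Android smali类型转换为java类型
--     :param smali_type:
--     :return:
--     """
--     java_type = ""
--     if smali_type == "Z":
--         java_type = "boolean"
--     elif smali_type == "B":
--         java_type = "byte"
--     elif smali_type == "S":
--         java_type = "short"
--     elif smali_type == "C":
--         java_type = "char"
--     elif smali_type == "I":
--         java_type = "int"
--     elif smali_type == "J":
--         java_type = "long"
--     elif smali_type == "F":
--         java_type = "float"
--     elif smali_type == "D":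
--         java_type = "double"
--     elif smali_type == "V":
--         java_type = "void"
--     elif smali_type.startswith("["):
--         # 处理数组类型
--         element_type = smali_to_java(smali_type[1:])
--         java_type = f"{element_type}[]"
--     elif smali_type.startswith("L") and smali_type.endswith(";"):
--         # 处理引用类型
--         class_name = smali_type[1:-1].replace("/", ".")
--         java_type = class_name
--
--     return java_type
-- ===== SOURCE B (Python) =====
-- _PRIMS = {
--     "Z": "boolean", "B": "byte", "S": "short", "C": "char", "I": "int",
--     "J": "long", "F": "float", "D": "double", "V": "void",
-- }
--
--
-- def smali_to_java(smali_type):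
--     # Count leading '[' chars, resolve the remaining base descriptor with one
--     # flat lookup, then append '[]' once per array dimension.
--     n = 0
--     while n < len(smali_type) and smali_type[n] == "[":
--         n += 1
--     base_desc = smali_type[n:]
--     if base_desc in _PRIMS:
--         base = _PRIMS[base_desc]
--     elif base_desc.startswith("L") and base_desc.endswith(";"):
--         base = base_desc[1:-1].replace("/", ".")
--     else:
--         base = ""
--     return base + "[]" * n
-- ===== Notes on version B (the rewrite author's own statement) =====
-- stated objective: simpler
-- what changed: Replaces the recursive array case (one recursive call per leading bracket) by a flat count of leading opening brackets plus a single dict lookup for the base descriptor, then appends one bracket pair per array dimension.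
import Mathlib
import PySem

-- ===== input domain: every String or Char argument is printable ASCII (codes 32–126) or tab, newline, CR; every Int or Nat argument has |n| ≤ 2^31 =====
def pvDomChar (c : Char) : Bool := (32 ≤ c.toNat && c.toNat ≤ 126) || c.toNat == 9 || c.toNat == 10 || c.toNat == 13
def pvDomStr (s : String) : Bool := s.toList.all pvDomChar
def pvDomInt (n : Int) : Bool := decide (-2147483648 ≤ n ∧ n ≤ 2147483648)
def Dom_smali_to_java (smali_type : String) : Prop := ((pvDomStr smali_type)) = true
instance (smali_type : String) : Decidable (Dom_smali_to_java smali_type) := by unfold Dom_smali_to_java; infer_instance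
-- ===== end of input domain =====

-- B replaces A's recursion over leading array brackets by a flat bracket count plus one dict lookup (simpler decomposition).

-- ===== PORT A =====
-- A's recursive if/elif chain, on the character list (termination: the '[' branch recurses on the tail).
def smaliA (cs : List Char) : List Char :=
  if cs = ['Z'] then ['b', 'o', 'o', 'l', 'e', 'a', 'n']
  else if cs = ['B'] then ['b', 'y', 't', 'e']
  else if cs = ['S'] then ['s', 'h', 'o', 'r', 't']
  else if cs = ['C'] then ['c', 'h', 'a', 'r']
  else if cs = ['I'] then ['i', 'n', 't']
  else if cs = ['J'] then ['l', 'o', 'n', 'g']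
  else if cs = ['F'] then ['f', 'l', 'o', 'a', 't']
  else if cs = ['D'] then ['d', 'o', 'u', 'b', 'l', 'e']
  else if cs = ['V'] then ['v', 'o', 'i', 'd']
  else if h : PySem.Chars.startswith cs ['['] = true then
    smaliA (PySem.Chars.slice cs (some 1) none) ++ ['[', ']']
  else if PySem.Chars.startswith cs ['L'] && PySem.Chars.endswith cs [';'] then
    PySem.Chars.replace (PySem.Chars.slice cs (some 1) (some (-1))) ['/'] ['.']
  else []
termination_by cs.length
decreasing_by
  have hne : cs ≠ [] := by
    intro hnil
    rw [hnil] at h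
    simp [PySem.Chars.startswith_iff] at h
  simp [PySem.Chars.slice_eq_listSlice, PySem.List.slice_from_one]
  cases cs with
  | nil => exact absurd rfl hne
  | cons a t => simp

def smali_to_java (smali_type : String) : String := String.ofList (smaliA smali_type.toList)

-- ===== PORT B =====
-- the while loop of Source B counting leading '['
def leadBrackets : List Char → Nat
  | [] => 0
  | c :: rest => if c = '[' then leadBrackets rest + 1 else 0

-- Source B's _PRIMS dict
def primsB : PySem.Dict (List Char) (List Char) := PySem.Dict.ofList
  [(['Z'], ['b', 'o', 'o', 'l', 'e', 'a', 'n']), (['B'], ['b', 'y', 't', 'e']), (['S'], ['s', 'h', 'o', 'r', 't']),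
   (['C'], ['c', 'h', 'a', 'r']), (['I'], ['i', 'n', 't']), (['J'], ['l', 'o', 'n', 'g']),
   (['F'], ['f', 'l', 'o', 'a', 't']), (['D'], ['d', 'o', 'u', 'b', 'l', 'e']), (['V'], ['v', 'o', 'i', 'd'])]

def resolveBase (bd : List Char) : List Char :=
  match PySem.Dict.get? primsB bd with
  | some v => v
  | none =>
    if PySem.Chars.startswith bd ['L'] && PySem.Chars.endswith bd [';'] then
      PySem.Chars.replace (PySem.Chars.slice bd (some 1) (some (-1))) ['/'] ['.']
    else []

def smali_to_java_alt (smali_type : String) : String :=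
  let cs := smali_type.toList
  let n := leadBrackets cs
  let bd := PySem.Chars.slice cs (some (n : Int)) none
  String.ofList (resolveBase bd ++ (List.replicate n ['[', ']']).flatten)

-- ===== PRECONDITION & SPEC =====
def Spec_smali_to_java (smali_type : String) (out : String) : Prop := out = smali_to_java_alt smali_type
instance (smali_type : String) (out : String) : Decidable (Spec_smali_to_java smali_type out) := by unfold Spec_smali_to_java; infer_instance

-- ===== CLAIM (what is proved, stated in full; the proofs are below) =====
def Claim_equal_smali_to_java : Prop := ∀ (smali_type : String), Dom_smali_to_java smali_type → Spec_smali_to_java smali_type (smali_to_java smali_type)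

-- ===== LEMMAS AND PROOFS =====
lemma flatten_replicate_succ {α : Type} (n : Nat) (x : List α) :
    (List.replicate (n + 1) x).flatten = (List.replicate n x).flatten ++ x := by
  induction n with
  | zero => simp
  | succ m ih => simp [List.replicate_succ, List.flatten_cons] at *
                 simp [ih]

lemma main_eq (cs : List Char) :
    smaliA cs = resolveBase (cs.drop (leadBrackets cs)) ++ (List.replicate (leadBrackets cs) ['[', ']']).flatten := by
  induction cs with
  | nil => rw [smaliA]; decide
  | cons c rest ih =>
    by_cases hc : c = '['
    · subst hc
      rw [smaliA]
      have hsw : PySem.Chars.startswith ('[' :: rest) ['['] = true :=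
        (PySem.Chars.startswith_iff _ _).mpr ⟨rest, rfl⟩
      simp only [PySem.Chars.slice_eq_listSlice, PySem.List.slice_from_one, List.tail_cons,
        leadBrackets, hsw]
      simp only [show ('[' :: rest = ['Z']) = False by simp, show ('[' :: rest = ['B']) = False by simp,
        show ('[' :: rest = ['S']) = False by simp, show ('[' :: rest = ['C']) = False by simp,
        show ('[' :: rest = ['I']) = False by simp, show ('[' :: rest = ['J']) = False by simp,
        show ('[' :: rest = ['F']) = False by simp, show ('[' :: rest = ['D']) = False by simp,
        show ('[' :: rest = ['V']) = False by simp, if_false, if_true, dite_true]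
      rw [ih, List.drop_succ_cons, flatten_replicate_succ, List.append_assoc]
    · have hlb : leadBrackets (c :: rest) = 0 := by simp [leadBrackets, hc]
      rw [hlb, List.drop_zero]
      simp only [List.replicate_zero, List.flatten_nil, List.append_nil]
      -- primitive cases
      by_cases h1 : c :: rest = ['Z']; · rw [h1, smaliA]; decide
      by_cases h2 : c :: rest = ['B']; · rw [h2, smaliA]; decide
      by_cases h3 : c :: rest = ['S']; · rw [h3, smaliA]; decide
      by_cases h4 : c :: rest = ['C']; · rw [h4, smaliA]; decide
      by_cases h5 : c :: rest = ['I']; · rw [h5, smaliA]; decide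
      by_cases h6 : c :: rest = ['J']; · rw [h6, smaliA]; decide
      by_cases h7 : c :: rest = ['F']; · rw [h7, smaliA]; decide
      by_cases h8 : c :: rest = ['D']; · rw [h8, smaliA]; decide
      by_cases h9 : c :: rest = ['V']; · rw [h9, smaliA]; decide
      have hsw : PySem.Chars.startswith (c :: rest) ['['] = false := by
        rw [Bool.eq_false_iff]
        intro h
        rcases (PySem.Chars.startswith_iff _ _).mp h with ⟨t, ht⟩
        simp at ht
        exact hc ht.1.symm
      rw [smaliA]
      simp only [h1, h2, h3, h4, h5, h6, h7, h8, h9, if_false, hsw]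
      have hget : PySem.Dict.get? primsB (c :: rest) = none := by
        have hmk : primsB = PySem.Dict.mk
            [(['Z'], ['b','o','o','l','e','a','n']), (['B'], ['b','y','t','e']), (['S'], ['s','h','o','r','t']),
             (['C'], ['c','h','a','r']), (['I'], ['i','n','t']), (['J'], ['l','o','n','g']),
             (['F'], ['f','l','o','a','t']), (['D'], ['d','o','u','b','l','e']), (['V'], ['v','o','i','d'])] := by decide
        have e1 : (['Z'] == c :: rest) = false := beq_eq_false_iff_ne.mpr (fun h => h1 h.symm)
        have e2 : (['B'] == c :: rest) = false := beq_eq_false_iff_ne.mpr (fun h => h2 h.symm)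
        have e3 : (['S'] == c :: rest) = false := beq_eq_false_iff_ne.mpr (fun h => h3 h.symm)
        have e4 : (['C'] == c :: rest) = false := beq_eq_false_iff_ne.mpr (fun h => h4 h.symm)
        have e5 : (['I'] == c :: rest) = false := beq_eq_false_iff_ne.mpr (fun h => h5 h.symm)
        have e6 : (['J'] == c :: rest) = false := beq_eq_false_iff_ne.mpr (fun h => h6 h.symm)
        have e7 : (['F'] == c :: rest) = false := beq_eq_false_iff_ne.mpr (fun h => h7 h.symm)
        have e8 : (['D'] == c :: rest) = false := beq_eq_false_iff_ne.mpr (fun h => h8 h.symm)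
        have e9 : (['V'] == c :: rest) = false := beq_eq_false_iff_ne.mpr (fun h => h9 h.symm)
        simp only [hmk, PySem.Dict.get?_mk_cons, e1, e2, e3, e4, e5, e6, e7, e8, e9, if_false, Bool.false_eq_true]
        simp [PySem.Dict.get?]
      rw [resolveBase, hget]
      simp

theorem smali_to_java_spec : Claim_equal_smali_to_java := by
  intro s _
  unfold Spec_smali_to_java smali_to_java smali_to_java_alt
  rw [main_eq]
  simp [PySem.Chars.slice_eq_listSlice, PySem.List.slice_from_natCast]
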